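-- pv_equiv track=rewrite | github.com/Wang-Benjamin/rag-powered-crm | crm/services/rag/evaluation/metrics.py | precision_violations
-- ===== SOURCE A (Python) =====
-- from typing import Dict, Iterable, Mapping, Sequence, Tuple
--
-- Ref = Tuple[str, int]
--
-- def precision_violations(
--     predicted: Sequence[Ref],
--     must_not_cite: Iterable[Ref],
--     k: int,
-- ) -> int:
--     """Count of must_not_cite refs that leaked into the top-k. Lower is better."""
--     forbidden = set(must_not_cite)
--     if not forbidden:
--         return 0
--     return sum(1 for r in predicted[:k] if r in forbidden)
-- ===== SOURCE B (Python) =====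
-- def precision_violations(predicted, must_not_cite, k):
--     """Count of must_not_cite refs that leaked into the top-k. Lower is better."""
--     top = list(predicted[:k])
--     return sum(top.count(r) for r in set(must_not_cite))
-- ===== Notes on version B (the rewrite author's own statement) =====
-- stated objective: simpler
-- what changed: B inverts the traversal: instead of scanning the top-k slice and testing set membership (with an empty-set guard), it iterates over the distinct forbidden refs and sums each one's occurrence count in the top-k slice, with no guard or conditional at all.
import Mathlib
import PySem

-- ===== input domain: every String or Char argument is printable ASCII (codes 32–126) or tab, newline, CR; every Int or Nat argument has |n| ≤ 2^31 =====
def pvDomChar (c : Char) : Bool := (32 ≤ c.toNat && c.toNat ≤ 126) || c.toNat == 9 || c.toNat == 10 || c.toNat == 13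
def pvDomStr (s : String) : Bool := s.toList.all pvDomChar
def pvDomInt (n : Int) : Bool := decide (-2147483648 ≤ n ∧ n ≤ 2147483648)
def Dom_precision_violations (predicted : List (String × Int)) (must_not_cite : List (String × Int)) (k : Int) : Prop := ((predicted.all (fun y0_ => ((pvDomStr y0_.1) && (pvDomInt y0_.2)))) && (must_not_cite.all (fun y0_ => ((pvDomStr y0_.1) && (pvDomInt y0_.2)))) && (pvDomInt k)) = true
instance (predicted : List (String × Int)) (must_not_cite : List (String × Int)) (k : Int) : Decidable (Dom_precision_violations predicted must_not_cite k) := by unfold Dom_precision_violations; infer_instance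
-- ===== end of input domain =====

-- B inverts the traversal: it iterates over the distinct forbidden refs and sums each
-- one's occurrence count in the top-k slice, needing no empty-set guard ("simpler").

-- ===== PORT A =====
-- forbidden = set(must_not_cite); if not forbidden: return 0; sum(1 for r in predicted[:k] if r in forbidden)
def precision_violations (predicted : List (String × Int)) (must_not_cite : List (String × Int)) (k : Int) : Int :=
  let forbidden : PySem.Set (String × Int) := PySem.Set.ofList must_not_cite
  if forbidden = [] then 0
  else
    (PySem.List.slice predicted none (some k)).foldl
      (fun acc r => if PySem.Set.contains forbidden r then acc + 1 else acc) 0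

-- ===== PORT B =====
-- top = list(predicted[:k]); return sum(top.count(r) for r in set(must_not_cite))
def precision_violations_alt (predicted : List (String × Int)) (must_not_cite : List (String × Int)) (k : Int) : Int :=
  let top := PySem.List.slice predicted none (some k)
  ((PySem.Set.ofList must_not_cite).map (fun r => (PySem.List.count top r : Int))).sum

-- ===== PRECONDITION & SPEC =====
def Spec_precision_violations (predicted : List (String × Int)) (must_not_cite : List (String × Int)) (k : Int) (out : Int) : Prop := out = precision_violations_alt predicted must_not_cite k
instance (predicted : List (String × Int)) (must_not_cite : List (String × Int)) (k : Int) (out : Int) : Decidable (Spec_precision_violations predicted must_not_cite k out) := by unfold Spec_precision_violations; infer_instance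

-- ===== CLAIM (what is proved, stated in full; the proofs are below) =====
def Claim_equal_precision_violations : Prop := ∀ (predicted : List (String × Int)) (must_not_cite : List (String × Int)) (k : Int), Dom_precision_violations predicted must_not_cite k → Spec_precision_violations predicted must_not_cite k (precision_violations predicted must_not_cite k)

-- ===== LEMMAS AND PROOFS =====

-- On a duplicate-free list l, summing each element's multiplicity in xs counts
-- exactly the elements of xs that lie in l.
theorem sum_count_eq_countP {α : Type} [BEq α] [LawfulBEq α] (l : List α) (hl : l.Nodup)
    (xs : List α) :
    (l.map (fun r => (xs.count r : Int))).sum = (xs.countP (fun r => l.contains r) : Int) := by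
  induction xs with
  | nil => simp
  | cons x xs ih =>
    simp only [List.count_cons, List.countP_cons]
    push_cast
    rw [PySem.List.sum_map_add_int, ih, PySem.List.sum_map_ite_one_zero]
    have hcnt : List.countP (fun r => x == r) l = l.count x := by
      rw [List.count_eq_countP]
      refine List.countP_congr fun a _ => ?_
      simp only [beq_iff_eq]
      exact eq_comm
    rw [hcnt]
    by_cases hx : x ∈ l
    · simp [hx, List.count_eq_one_of_mem hl hx]
    · simp [hx, List.count_eq_zero_of_not_mem hx]

-- ===== VERDICT (by name: the statement is the Claim_ definition above) =====
theorem precision_violations_spec : Claim_equal_precision_violations := by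
  intro predicted must_not_cite k _
  unfold Spec_precision_violations precision_violations precision_violations_alt
  by_cases h : PySem.Set.ofList must_not_cite = ([] : List (String × Int))
  · simp [h]
  · simp only [if_neg h]
    rw [PySem.List.foldl_if_add_one]
    simp only [PySem.List.count_eq]
    rw [sum_count_eq_countP _ (PySem.Set.nodup_ofList must_not_cite)]
    rw [zero_add]
    rfl
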